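-- pv_equiv track=rewrite | github.com/juandausa/CompetitiveProgrammingCoreSkills | Semana 1/ejemplosTest.py | solve4
-- ===== SOURCE A (Python) =====
-- def solve4(s):
--   toDelete = s[0]
--   others = ""
--   for c in s:
--     if c != toDelete:
--       others += c
--   s = others
--
--   #prefix of length 1 surely doesn't contain different letters
--   prefix = s[0]
--   for i in range(1, len(s)):
--     #each letter should be the same as the first
--     if s[i] == prefix[0]:
--       prefix += s[i]
--     else:
--       break
--   return prefix
-- ===== SOURCE B (Python) =====
-- def solve4(s):
--     toDelete = s[0]
--     i = 0
--     n = len(s)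
--     while i < n and s[i] == toDelete:
--         i += 1
--     first = s[i]  # IndexError here exactly when s consists only of s[0] (as in A)
--     count = 1
--     for j in range(i + 1, n):
--         c = s[j]
--         if c == first:
--             count += 1
--         elif c != toDelete:
--             break
--     return first * count
-- ===== Notes on version B (the rewrite author's own statement) =====
-- stated objective: faster
-- what changed: B computes the answer in one index scan (skip the leading run of s[0], then count the run of the next surviving char, skipping s[0] chars) instead of building the whole filtered string by repeated concatenation and then re-scanning it.
import Mathlib
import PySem

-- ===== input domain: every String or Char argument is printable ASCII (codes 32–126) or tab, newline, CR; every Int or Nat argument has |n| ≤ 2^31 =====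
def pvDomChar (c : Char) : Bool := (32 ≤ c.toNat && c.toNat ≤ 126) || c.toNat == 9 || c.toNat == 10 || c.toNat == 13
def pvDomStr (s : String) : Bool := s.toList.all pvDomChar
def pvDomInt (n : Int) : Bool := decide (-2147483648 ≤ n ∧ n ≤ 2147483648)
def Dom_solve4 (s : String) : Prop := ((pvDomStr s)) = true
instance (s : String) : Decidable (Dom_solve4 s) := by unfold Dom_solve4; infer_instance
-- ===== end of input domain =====

-- B replaces A's filter-then-rescan (quadratic string building) by a single scan; return value only.

-- ===== PORT A =====
-- A's second loop: extend prefix while s[i] == prefix[0], break otherwise.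
def solve4PrefLoop (p0 : Char) (acc : List Char) : List Char → List Char
  | [] => acc
  | c :: cs => if c == p0 then solve4PrefLoop p0 (acc ++ [c]) cs else acc

def solve4 (s : String) : String :=
  match s.toList with
  | [] => ""  -- Python raises IndexError on s[0]; excluded by Pre_solve4
  | d :: _ =>
    let others := s.toList.foldl (fun acc c => if c ≠ d then acc ++ [c] else acc) []
    match others with
    | [] => ""  -- Python raises IndexError on s[0] of the filtered string; excluded by Pre_solve4
    | p :: rest => String.mk (solve4PrefLoop p [p] rest)

-- ===== PORT B =====
-- B's counting loop: count chars equal to `first`, skip chars equal to `d`, break otherwise.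
def solve4AltCount (d first : Char) : List Char → Nat → Nat
  | [], n => n
  | c :: cs, n =>
    if c == first then solve4AltCount d first cs (n + 1)
    else if c == d then solve4AltCount d first cs n
    else n

def solve4_alt (s : String) : String :=
  match s.toList with
  | [] => ""  -- Python raises IndexError on s[0]; excluded by Pre_solve4
  | d :: _ =>
    match s.toList.dropWhile (· == d) with
    | [] => ""  -- Python raises IndexError on s[i]; excluded by Pre_solve4
    | first :: tail => String.mk (List.replicate (solve4AltCount d first tail 1) first)

-- ===== PRECONDITION & SPEC =====
-- Pre_ excludes exactly the inputs where A raises IndexError (B raises there too):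
-- the empty string, and strings whose every character equals the first one.
def Pre_solve4 (s : String) : Prop :=
  s.toList ≠ [] ∧ (s.toList.any (fun c => c != s.toList.headD ' ')) = true
instance (s : String) : Decidable (Pre_solve4 s) := by unfold Pre_solve4; infer_instance
def pvWitness_solve4 : String := "ab"

def Spec_solve4 (s : String) (out : String) : Prop := out = solve4_alt s
instance (s : String) (out : String) : Decidable (Spec_solve4 s out) := by unfold Spec_solve4; infer_instance

-- ===== CLAIM (what is proved, stated in full; the proofs are below) =====
def Claim_equal_solve4 : Prop := ∀ (s : String), Dom_solve4 s → Pre_solve4 s → Spec_solve4 s (solve4 s)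

-- ===== LEMMAS AND PROOFS =====

-- A's filter loop builds acc ++ filter.
theorem solve4_foldl_filter (d : Char) (l acc : List Char) :
    l.foldl (fun acc c => if c ≠ d then acc ++ [c] else acc) acc
      = acc ++ l.filter (fun c => c ≠ d) := by
  induction l generalizing acc with
  | nil => simp
  | cons c cs ih =>
    rw [List.foldl_cons, List.filter_cons]
    by_cases h : c = d
    · rw [if_neg (by simp [h]), if_neg (by simp [h])]
      exact ih acc
    · rw [if_pos h, if_pos (by simp [h]), ih (acc ++ [c])]
      simp

-- A's prefix loop is acc ++ takeWhile.
theorem solve4PrefLoop_eq (p0 : Char) (acc l : List Char) :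
    solve4PrefLoop p0 acc l = acc ++ l.takeWhile (· == p0) := by
  induction l generalizing acc with
  | nil => simp [solve4PrefLoop]
  | cons c cs ih =>
    by_cases h : c = p0 <;> simp [solve4PrefLoop, h, ih]

-- takeWhile (== p) yields a replicate of p.
theorem takeWhile_eq_replicate (p : Char) (l : List Char) :
    l.takeWhile (· == p) = List.replicate (l.takeWhile (· == p)).length p := by
  induction l with
  | nil => simp
  | cons c cs ih =>
    by_cases h : c = p
    · have hb : (c == p) = true := by simp [h]
      simp [h, List.replicate_succ]
      exact ih
    · have hb : (c == p) = false := by simp [h]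
      simp [hb]

-- dropWhile relates to filter: the first surviving char heads the filtered list.
theorem filter_dropWhile (d : Char) (l : List Char) :
    (l.dropWhile (· == d)).filter (fun c => c ≠ d) = l.filter (fun c => c ≠ d) := by
  induction l with
  | nil => simp
  | cons c cs ih =>
    by_cases h : c = d
    · rw [List.dropWhile_cons, if_pos (by simp [h]), List.filter_cons, if_neg (by simp [h])]
      exact ih
    · rw [List.dropWhile_cons, if_neg (by simp [h])]

-- B's counting loop counts the leading run of `first` in the filtered list.
theorem solve4AltCount_eq (d p : Char) (hp : p ≠ d) (l : List Char) (n : Nat) :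
    solve4AltCount d p l n = n + ((l.filter (fun c => c ≠ d)).takeWhile (· == p)).length := by
  induction l generalizing n with
  | nil => simp [solve4AltCount]
  | cons c cs ih =>
    by_cases h1 : c = p
    · subst h1
      simp [solve4AltCount, List.filter, hp, ih]
      omega
    · by_cases h2 : c = d
      · subst h2
        simp [solve4AltCount, Ne.symm hp, List.filter, ih]
      · simp [solve4AltCount, h1, h2, List.filter]

-- ===== VERDICT (by name: the statement is the Claim_ definition above) =====
theorem solve4_spec : Claim_equal_solve4 := by
  intro s _ hpre
  unfold Spec_solve4 solve4 solve4_alt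
  obtain ⟨hne, hany⟩ := hpre
  obtain ⟨c0, hc0mem, hc0'⟩ := List.any_eq_true.mp hany
  have hc0 : c0 ≠ s.toList.headD ' ' := by simpa using hc0'
  match hL : s.toList with
  | [] => exact absurd hL hne
  | d :: rest =>
    simp only
    rw [hL] at hc0mem hc0
    simp only [List.headD] at hc0
    -- the filtered list is nonempty and headed by the first non-d char
    have hfil : ((d :: rest).dropWhile (· == d)).filter (fun c => c ≠ d)
        = (d :: rest).filter (fun c => c ≠ d) := filter_dropWhile d (d :: rest)
    match hD : (d :: rest).dropWhile (· == d) with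
    | [] =>
      -- impossible: c0 ≠ d is in the list, so dropWhile cannot exhaust it
      exfalso
      have : c0 ∈ (d :: rest).takeWhile (· == d) := by
        have := List.takeWhile_append_dropWhile (p := (· == d)) (l := d :: rest)
        rw [hD, List.append_nil] at this
        rw [this]; exact hc0mem
      have := List.mem_takeWhile_imp this
      simp at this
      exact hc0 this
    | p :: tail =>
      have hpd : p ≠ d := by
        have := List.head?_dropWhile_not (p := (· == d)) (l := d :: rest)
        rw [hD] at this
        simpa using this
      rw [hD] at hfil
      have hfilter : (d :: rest).filter (fun c => c ≠ d) = p :: tail.filter (fun c => c ≠ d) := by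
        rw [← hfil]; simp [List.filter, hpd]
      rw [solve4_foldl_filter, hfilter]
      show String.mk (solve4PrefLoop p [p] (tail.filter (fun c => decide (c ≠ d))))
          = String.mk (List.replicate (solve4AltCount d p tail 1) p)
      rw [solve4PrefLoop_eq, solve4AltCount_eq d p hpd]
      rw [takeWhile_eq_replicate p (tail.filter (fun c => decide (c ≠ d)))]
      rw [Nat.add_comm]
      simp [List.replicate_succ]
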